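-- pv_equiv track=rewrite | github.com/jchstrfld/nominal-news | summarize_grouped_topics.py | make_html_chips
-- ===== SOURCE A (Python) =====
-- def make_html_chips(articles):
--     color_map = {
--         "Far Left": "#0B36B8",
--         "Left": "#275BF5",
--         "Center": "#894AB3",
--         "Right": "#EB4040",
--         "Far Right": "#C43D31",
--         "Unknown": "#C6C6C6"
--     }
--     bias_order = ["Far Left", "Left", "Center", "Right", "Far Right", "Unknown"]
--
--     def bias_sort_key(article):
--         bias = (article.get("bias") or "Unknown").title().replace("-", " ")
--         if bias not in bias_order:
--             bias = "Unknown"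
--         return (bias_order.index(bias), (article.get("source_name") or "").lower())
--
--     sorted_articles = sorted(articles, key=bias_sort_key)
--
--     chips = []
--     for a in sorted_articles:
--         url = a.get("url", "#")
--         source = a.get("source_name") or url.split("//")[-1].split("/")[0]
--         bias = (a.get("bias") or "Unknown").title().replace("-", " ")
--         if bias not in color_map:
--             bias = "Unknown"
--         bias_color = color_map[bias]
--         bias_color_20 = bias_color + "33"
--         chips.append(
--             f'<a href="{url}" target="_blank" class="chip" '
--             f'style="background-color: {bias_color_20}; border-color: {bias_color};">{source}</a>'
--         )
--     return " ".join(chips)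
-- ===== SOURCE B (Python) =====
-- def make_html_chips(articles):
--     color_map = {
--         "Far Left": "#0B36B8",
--         "Left": "#275BF5",
--         "Center": "#894AB3",
--         "Right": "#EB4040",
--         "Far Right": "#C43D31",
--         "Unknown": "#C6C6C6"
--     }
--     bias_order = ["Far Left", "Left", "Center", "Right", "Far Right", "Unknown"]
--
--     def norm_bias(a):
--         bias = (a.get("bias") or "Unknown").title().replace("-", " ")
--         return bias if bias in bias_order else "Unknown"
--
--     # one pass: distribute articles into per-bias buckets (stable)
--     buckets = [[] for _ in bias_order]
--     for a in articles:
--         buckets[bias_order.index(norm_bias(a))].append(a)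
--
--     chips = []
--     for bias, bucket in zip(bias_order, buckets):
--         color = color_map[bias]
--         for a in sorted(bucket, key=lambda a: (a.get("source_name") or "").lower()):
--             url = a.get("url", "#")
--             source = a.get("source_name") or url.split("//")[-1].split("/")[0]
--             chips.append(
--                 f'<a href="{url}" target="_blank" class="chip" '
--                 f'style="background-color: {color}33; border-color: {color};">{source}</a>'
--             )
--     return " ".join(chips)
-- ===== Notes on version B (the rewrite author's own statement) =====
-- stated objective: alternative
-- what changed: Replaces A's single global sorted() with a composite (bias-index, lowercased-source) key by a one-pass distribution of the articles into six per-bias buckets followed by a stable per-bucket sort on the source key alone, emitting chips bucket by bucket in the fixed bias order with the color looked up once per bucket.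
import Mathlib
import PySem

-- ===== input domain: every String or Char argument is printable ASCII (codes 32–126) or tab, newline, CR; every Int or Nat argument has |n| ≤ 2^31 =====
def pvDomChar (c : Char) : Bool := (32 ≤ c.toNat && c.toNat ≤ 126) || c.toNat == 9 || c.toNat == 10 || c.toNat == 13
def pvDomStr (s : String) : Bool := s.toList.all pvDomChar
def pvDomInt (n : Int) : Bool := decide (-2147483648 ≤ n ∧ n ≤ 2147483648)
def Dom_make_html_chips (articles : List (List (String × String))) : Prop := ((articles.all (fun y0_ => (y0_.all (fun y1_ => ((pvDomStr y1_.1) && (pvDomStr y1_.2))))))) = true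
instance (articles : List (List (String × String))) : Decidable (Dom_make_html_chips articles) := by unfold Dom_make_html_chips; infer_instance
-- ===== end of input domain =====

-- B replaces A's single global sort under a composite (bias-index, source) key by a one-pass
-- distribution into six per-bias buckets followed by a per-bucket sort on the source only
-- (objective: alternative decomposition, same observable result).

-- ===== shared low-level helpers (both Pythons use the same primitives) =====

-- article.get(k): first-match association-list lookup (Python dict semantics)
def dget (a : List (String × String)) (k : String) : Option String := (PySem.Dict.mk a).get? k

-- Python '<expr> or <dflt>' for str-valued expr (falsy = None or "")
def orStr (o : Option String) (dflt : String) : String :=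
  match o with
  | none => dflt
  | some s => if s = "" then dflt else s

-- str.title(): hand port, exact on ASCII (cased = letters); a letter after a non-letter is
-- uppercased, a letter after a letter is lowercased, other chars pass through.
def pyTitleAux : List Char → Bool → List Char
  | [], _ => []
  | c :: cs, prev =>
      (if PySem.Chars.isalpha c then
        (if prev then PySem.Chars.lowerChar c else PySem.Chars.upperChar c)
       else c) :: pyTitleAux cs (PySem.Chars.isalpha c)

def pyTitle (s : String) : String := String.ofList (pyTitleAux s.toList false)

def biasOrder : List String := ["Far Left", "Left", "Center", "Right", "Far Right", "Unknown"]

def colorMap : PySem.Dict String String :=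
  PySem.Dict.mk [("Far Left", "#0B36B8"), ("Left", "#275BF5"), ("Center", "#894AB3"),
                 ("Right", "#EB4040"), ("Far Right", "#C43D31"), ("Unknown", "#C6C6C6")]

-- (article.get("bias") or "Unknown").title().replace("-", " ")
def rawBias (a : List (String × String)) : String :=
  PySem.Str.replace (pyTitle (orStr (dget a "bias") "Unknown")) "-" " "

-- (article.get("source_name") or "").lower()
def srcLower (a : List (String × String)) : String :=
  PySem.Str.lower (orStr (dget a "source_name") "")

-- url.split("//")[-1].split("/")[0]
def hostOf (url : String) : String :=
  PySem.List.pyGetD ((PySem.Str.split? (PySem.List.pyGetD ((PySem.Str.split? url "//").getD []) (-1) "") "/").getD []) 0 ""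

-- ===== PORT A =====

-- first component of A's bias_sort_key (bias_order.index after the not-in fallback);
-- .getD 0 is a totality guard only: the looked-up string is always a member of bias_order
def biasKeyA (a : List (String × String)) : Nat :=
  (PySem.List.index? biasOrder (if rawBias a ∈ biasOrder then rawBias a else "Unknown")).getD 0

-- the chip built in A's loop (bias recomputed from the article, fallback via color_map keys)
def chipA (a : List (String × String)) : String :=
  let url := (dget a "url").getD "#"
  let source := orStr (dget a "source_name") (hostOf url)
  let bias := rawBias a
  let bias := if colorMap.contains bias then bias else "Unknown"
  let c := (colorMap.get? bias).getD ""
  "<a href=\"" ++ url ++ "\" target=\"_blank\" class=\"chip\" style=\"background-color: " ++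
    c ++ "33; border-color: " ++ c ++ ";\">" ++ source ++ "</a>"

def make_html_chips (articles : List (List (String × String))) : String :=
  let sortedArticles := PySem.List.sorted2 articles biasKeyA srcLower
  PySem.Str.join " " (sortedArticles.foldl (fun chips a => chips ++ [chipA a]) [])

-- ===== PORT B =====

-- norm_bias of Source B
def normBias (a : List (String × String)) : String :=
  if rawBias a ∈ biasOrder then rawBias a else "Unknown"

-- bias_order.index(norm_bias(a)); .getD 0 is a totality guard only (norm_bias ∈ bias_order)
def idxOf (a : List (String × String)) : Nat :=
  (PySem.List.index? biasOrder (normBias a)).getD 0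

-- the chip built in Source B's inner loop (color computed once per bucket, passed in)
def chipOf (color : String) (a : List (String × String)) : String :=
  let url := (dget a "url").getD "#"
  let source := orStr (dget a "source_name") (hostOf url)
  "<a href=\"" ++ url ++ "\" target=\"_blank\" class=\"chip\" style=\"background-color: " ++
    color ++ "33; border-color: " ++ color ++ ";\">" ++ source ++ "</a>"

def make_html_chips_alt (articles : List (List (String × String))) : String :=
  let buckets := articles.foldl
    (fun bs a => bs.set (idxOf a) (bs.getD (idxOf a) [] ++ [a]))
    [[], [], [], [], [], []]
  let chips := (biasOrder.zip buckets).foldl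
    (fun acc p =>
      let color := (colorMap.get? p.1).getD ""
      (PySem.List.sorted p.2 srcLower).foldl (fun acc2 a => acc2 ++ [chipOf color a]) acc)
    []
  PySem.Str.join " " chips

-- ===== PRECONDITION & SPEC =====
def Spec_make_html_chips (articles : List (List (String × String))) (out : String) : Prop := out = make_html_chips_alt articles
instance (articles : List (List (String × String))) (out : String) : Decidable (Spec_make_html_chips articles out) := by unfold Spec_make_html_chips; infer_instance

-- ===== CLAIM (what is proved, stated in full; the proofs are below) =====
def Claim_equal_make_html_chips : Prop := ∀ (articles : List (List (String × String))), Dom_make_html_chips articles → Spec_make_html_chips articles (make_html_chips articles)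

-- ===== LEMMAS AND PROOFS =====

-- the comparison sorted2 uses with A's two keys
def lexB (a b : List (String × String)) : Bool :=
  decide (idxOf a < idxOf b) || (!decide (idxOf b < idxOf a) && decide (srcLower a < srcLower b))

-- per-bucket sort of Source B
def sortK (b : List (List (String × String))) : List (List (String × String)) :=
  PySem.List.sorted b srcLower

-- Source B's bucket-distribution loop
def bucketStep (bs : List (List (List (String × String)))) (a : List (String × String)) :
    List (List (List (String × String))) :=
  bs.set (idxOf a) (bs.getD (idxOf a) [] ++ [a])

def bucketsOf (xs : List (List (String × String))) : List (List (List (String × String))) :=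
  xs.foldl bucketStep [[], [], [], [], [], []]

theorem idxOf_lt (a : List (String × String)) : idxOf a < 6 := by
  unfold idxOf
  cases h : PySem.List.index? biasOrder (normBias a) with
  | none => simp
  | some k =>
      obtain ⟨pre, suf, hx, hlen, -⟩ := (PySem.List.index?_eq_some_iff _ _ _).1 h
      have h6 : biasOrder.length = 6 := by decide
      have := congrArg List.length hx
      simp only [List.length_append, List.length_cons, h6] at this
      simp only [Option.getD_some]
      omega

theorem normBias_mem (a : List (String × String)) : normBias a ∈ biasOrder := by
  unfold normBias
  split_ifs with h
  · exact h
  · decide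

theorem biasOrder_at_idxOf (a : List (String × String)) :
    biasOrder[idxOf a]? = some (normBias a) := by
  have h := normBias_mem a
  unfold idxOf
  generalize normBias a = v at *
  fin_cases h <;> decide

-- insertBy walks past a prefix it never goes before
theorem insertBy_append_not_before {α : Type} (before : α → α → Bool) (x : α)
    (pre t : List α) (h : ∀ y ∈ pre, before x y = false) :
    PySem.List.insertBy before x (pre ++ t) = pre ++ PySem.List.insertBy before x t := by
  induction pre with
  | nil => simp
  | cons y ys ih =>
      simp only [List.cons_append, PySem.List.insertBy]
      rw [h y (by simp)]
      simp only [Bool.false_eq_true, if_false, List.cons.injEq, true_and]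
      exact ih (fun z hz => h z (by simp [hz]))

-- insertBy stops before a suffix it goes before entirely
theorem insertBy_append_before {α : Type} (before : α → α → Bool) (x : α)
    (L rest : List α) (h : ∀ y ∈ rest, before x y = true) :
    PySem.List.insertBy before x (L ++ rest) = PySem.List.insertBy before x L ++ rest := by
  induction L with
  | nil =>
      cases rest with
      | nil => simp [PySem.List.insertBy]
      | cons z zs => simp [PySem.List.insertBy, h z (by simp)]
  | cons y ys ih =>
      simp only [List.cons_append, PySem.List.insertBy]
      by_cases hb : before x y
      · simp [hb]
      · simp only [hb]
        simp [ih]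

theorem insertBy_congr {α : Type} (b1 b2 : α → α → Bool) (x : α) (L : List α)
    (h : ∀ y ∈ L, b1 x y = b2 x y) :
    PySem.List.insertBy b1 x L = PySem.List.insertBy b2 x L := by
  induction L with
  | nil => rfl
  | cons y ys ih =>
      simp only [PySem.List.insertBy]
      rw [h y (by simp)]
      by_cases hb : b2 x y
      · simp [hb]
      · simp only [hb]
        simp [ih (fun z hz => h z (by simp [hz]))]

theorem sorted_append_singleton (b : List (List (String × String))) (x : List (String × String)) :
    sortK (b ++ [x]) =
      PySem.List.insertBy (fun a b => decide (srcLower a < srcLower b)) x (sortK b) := by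
  unfold sortK
  rw [PySem.List.sorted_eq_foldl_insertBy, PySem.List.sorted_eq_foldl_insertBy, List.foldl_append]
  rfl

theorem lexB_of_lt (x y : List (String × String)) (h : idxOf y < idxOf x) : lexB x y = false := by
  unfold lexB
  simp only [Bool.or_eq_false_iff, Bool.and_eq_false_iff]
  constructor
  · simpa using Nat.not_lt.2 (Nat.le_of_lt h)
  · left; simpa using h

theorem lexB_of_gt (x y : List (String × String)) (h : idxOf x < idxOf y) : lexB x y = true := by
  unfold lexB
  simp [h]

theorem lexB_of_eq (x y : List (String × String)) (h : idxOf x = idxOf y) :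
    lexB x y = decide (srcLower x < srcLower y) := by
  unfold lexB
  simp [h]

theorem insert_flatten :
    ∀ (bs : List (List (List (String × String)))) (base : Nat) (x : List (String × String)),
      (∀ j (hj : j < bs.length), ∀ y ∈ bs[j], idxOf y = base + j) →
      ∀ i, i < bs.length → idxOf x = base + i →
      PySem.List.insertBy lexB x ((bs.map sortK).flatten) =
        (((bs.set i ((bs.getD i []) ++ [x]))).map sortK).flatten := by
  intro bs
  induction bs with
  | nil => intro base x h i hi; simp at hi
  | cons b rest ih =>
      intro base x h i hi hx
      cases i with
      | zero =>
          have hrest : ∀ y ∈ (rest.map sortK).flatten, lexB x y = true := by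
            intro y hy
            obtain ⟨l, hl, hyl⟩ := List.mem_flatten.1 hy
            obtain ⟨bj, hbj, rfl⟩ := List.mem_map.1 hl
            obtain ⟨j, hj, rfl⟩ := List.mem_iff_getElem.1 hbj
            have hyb : y ∈ rest[j] := (PySem.List.mem_sorted _ _ _ _).1 hyl
            have := h (j + 1) (by simpa using Nat.succ_lt_succ hj) y (by simpa using hyb)
            exact lexB_of_gt x y (by omega)
          have hb : ∀ y ∈ sortK b, lexB x y = decide (srcLower x < srcLower y) := by
            intro y hy
            have hyb : y ∈ b := (PySem.List.mem_sorted _ _ _ _).1 hy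
            have := h 0 (by simp) y (by simpa using hyb)
            exact lexB_of_eq x y (by omega)
          simp only [List.map_cons, List.flatten_cons]
          rw [insertBy_append_before _ _ _ _ hrest,
              insertBy_congr lexB (fun a b => decide (srcLower a < srcLower b)) _ _ hb,
              ← sorted_append_singleton]
          simp [List.getD]
      | succ j =>
          have hb : ∀ y ∈ sortK b, lexB x y = false := by
            intro y hy
            have hyb : y ∈ b := (PySem.List.mem_sorted _ _ _ _).1 hy
            have := h 0 (by simp) y (by simpa using hyb)
            exact lexB_of_lt x y (by omega)
          simp only [List.map_cons, List.flatten_cons]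
          rw [insertBy_append_not_before _ _ _ _ hb]
          rw [ih (base + 1) x
                (fun k hk y hy => by
                  have := h (k + 1) (by simpa using Nat.succ_lt_succ hk) y (by simpa using hy)
                  omega)
                j (by simpa using Nat.lt_of_succ_lt_succ hi) (by omega)]
          simp [List.getD]

theorem buckets_inv :
    ∀ (xs : List (List (String × String))) (bs : List (List (List (String × String)))),
      bs.length = 6 → (∀ j (hj : j < bs.length), ∀ y ∈ bs[j], idxOf y = j) →
      (xs.foldl bucketStep bs).length = 6 ∧
        (∀ j (hj : j < (xs.foldl bucketStep bs).length), ∀ y ∈ (xs.foldl bucketStep bs)[j],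
          idxOf y = j) := by
  intro xs
  induction xs with
  | nil => intro bs h1 h2; exact ⟨h1, h2⟩
  | cons a t ih =>
      intro bs h1 h2
      simp only [List.foldl_cons]
      apply ih
      · simp [bucketStep, h1]
      · intro j hj y hy
        simp only [bucketStep, List.length_set] at hj
        simp only [bucketStep] at hy
        by_cases hji : idxOf a = j
        · subst hji
          rw [List.getElem_set_self] at hy
          rcases List.mem_append.1 hy with hmem | hmem
          · rw [List.getD_eq_getElem bs [] (by omega)] at hmem
            exact h2 _ (by omega) y hmem
          · simp only [List.mem_singleton] at hmem
            subst hmem; rfl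
        · rw [List.getElem_set_ne hji] at hy
          exact h2 j (by omega) y hy

theorem sorted2_lexB (u : List (List (String × String))) :
    PySem.List.sorted2 u biasKeyA srcLower =
      List.foldl (fun acc y => PySem.List.insertBy lexB y acc) [] u := rfl

theorem init_inv : ∀ j (hj : j < ([[], [], [], [], [], []] :
    List (List (List (String × String)))).length),
    ∀ y ∈ ([[], [], [], [], [], []] : List (List (List (String × String))))[j], idxOf y = j := by
  intro j hj y hy
  simp only [List.length_cons, List.length_nil] at hj
  interval_cases j <;> simp at hy

theorem sorted2_eq_buckets (xs : List (List (String × String))) :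
    PySem.List.sorted2 xs biasKeyA srcLower = ((bucketsOf xs).map sortK).flatten := by
  induction xs using List.reverseRecOn with
  | nil => rfl
  | append_singleton t x ih =>
      have hinv := buckets_inv t [[], [], [], [], [], []] (by decide) init_inv
      have hlt := idxOf_lt x
      rw [sorted2_lexB, List.foldl_append, List.foldl_cons, List.foldl_nil, ← sorted2_lexB, ih]
      unfold bucketsOf
      rw [List.foldl_append, List.foldl_cons, List.foldl_nil]
      exact insert_flatten _ 0 x (fun j hj y hy => by simpa using hinv.2 j hj y hy)
        (idxOf x) (by rw [hinv.1]; exact hlt) (by omega)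

theorem contains_colorMap (s : String) : colorMap.contains s = decide (s ∈ biasOrder) := by
  by_cases h : s ∈ biasOrder
  · fin_cases h <;> decide
  · simp only [biasOrder, List.mem_cons, List.not_mem_nil, or_false] at h
    push Not at h
    obtain ⟨h1, h2, h3, h4, h5, h6⟩ := h
    simp [colorMap, PySem.Dict.contains, biasOrder,
      Ne.symm h1, Ne.symm h2, Ne.symm h3, Ne.symm h4, Ne.symm h5, Ne.symm h6,
      h1, h2, h3, h4, h5, h6]

theorem chipA_eq (a : List (String × String)) :
    chipA a = chipOf ((colorMap.get? (normBias a)).getD "") a := by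
  simp only [chipA, chipOf, normBias, contains_colorMap]
  by_cases h : rawBias a ∈ biasOrder <;> simp [h]

theorem normBias_of_idx (y : List (String × String)) :
    biasOrder.getD (idxOf y) "" = normBias y := by
  have h := biasOrder_at_idxOf y
  have hlt : idxOf y < biasOrder.length := by
    have := idxOf_lt y; simpa [biasOrder] using this
  rw [List.getD_eq_getElem biasOrder "" hlt]
  rw [List.getElem?_eq_getElem hlt] at h
  exact Option.some.inj h

theorem map_chip (b : List (List (String × String))) (v : String)
    (hb : ∀ y ∈ b, normBias y = v) :
    (sortK b).map chipA = (sortK b).map (chipOf ((colorMap.get? v).getD "")) := by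
  apply List.map_congr_left
  intro y hy
  have hyb : y ∈ b := (PySem.List.mem_sorted _ _ _ _).1 hy
  rw [chipA_eq, hb y hyb]

theorem eq_six {α : Type} (bs : List α) (h : bs.length = 6) :
    ∃ a0 a1 a2 a3 a4 a5, bs = [a0, a1, a2, a3, a4, a5] := by
  match bs, h with
  | [a0, a1, a2, a3, a4, a5], _ => exact ⟨a0, a1, a2, a3, a4, a5, rfl⟩

theorem main_eq (articles : List (List (String × String))) :
    make_html_chips articles = make_html_chips_alt articles := by
  have hinv := buckets_inv articles [[], [], [], [], [], []] (by decide) init_inv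
  obtain ⟨b0, b1, b2, b3, b4, b5, hbs⟩ := eq_six (bucketsOf articles) hinv.1
  have hb : ∀ j (hj : j < 6), ∀ y ∈ ([b0, b1, b2, b3, b4, b5] :
      List (List (List (String × String))))[j], idxOf y = j := by
    intro j hj y hy
    have h6 : (bucketsOf articles).length = 6 := hinv.1
    have hj' : j < (bucketsOf articles).length := by omega
    have hge : (bucketsOf articles)[j]'hj' = ([b0, b1, b2, b3, b4, b5] :
        List (List (List (String × String))))[j]'(by simpa using hj) := List.getElem_of_eq hbs hj'
    refine hinv.2 j hj' y ?_
    show y ∈ (bucketsOf articles)[j]'hj'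
    rw [hge]; exact hy
  have hnb : ∀ j (hj : j < 6), ∀ y ∈ ([b0, b1, b2, b3, b4, b5] :
      List (List (List (String × String))))[j], normBias y = biasOrder.getD j "" := by
    intro j hj y hy
    rw [← normBias_of_idx y, hb j hj y hy]
  have m0 := map_chip b0 "Far Left" (fun y hy => by rw [hnb 0 (by omega) y hy]; rfl)
  have m1 := map_chip b1 "Left" (fun y hy => by rw [hnb 1 (by omega) y hy]; rfl)
  have m2 := map_chip b2 "Center" (fun y hy => by rw [hnb 2 (by omega) y hy]; rfl)
  have m3 := map_chip b3 "Right" (fun y hy => by rw [hnb 3 (by omega) y hy]; rfl)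
  have m4 := map_chip b4 "Far Right" (fun y hy => by rw [hnb 4 (by omega) y hy]; rfl)
  have m5 := map_chip b5 "Unknown" (fun y hy => by rw [hnb 5 (by omega) y hy]; rfl)
  have hbuck : articles.foldl
      (fun bs a => bs.set (idxOf a) (bs.getD (idxOf a) [] ++ [a]))
      [[], [], [], [], [], []] = [b0, b1, b2, b3, b4, b5] := hbs
  unfold make_html_chips make_html_chips_alt
  dsimp only
  rw [PySem.List.foldl_append_singleton_eq_map, List.nil_append, sorted2_eq_buckets, hbs, hbuck]
  simp only [biasOrder, List.zip_cons_cons, List.zip_nil_right, List.foldl_cons, List.foldl_nil,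
    List.map_cons, List.map_nil, List.flatten_cons, List.flatten_nil, List.map_append,
    PySem.List.foldl_append_singleton_eq_map]
  rw [m0, m1, m2, m3, m4, m5]
  simp [sortK, List.append_assoc]

-- ===== VERDICT (by name: the statement is the Claim_ definition above) =====
theorem make_html_chips_spec : Claim_equal_make_html_chips := by
  intro articles _
  unfold Spec_make_html_chips
  exact main_eq articles
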